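-- pv_equiv track=rewrite | github.com/stenknutsen/HomeGrownPOSTagger | PhaseFourTagging.py | IN_UNK_NN_PUNC_Tagger
-- ===== SOURCE A (Python) =====
-- def IN_UNK_NN_PUNC_Tagger(sent):
--     sentToReturn = []
--     skip = 0
--
--     for i in range(len(sent)):
--
--         if skip>0:
--             skip = skip -1
--             continue
--
--
--         if (i)<0 | (i+3)>=len(sent):
--             sentToReturn += [sent[i]]
--             continue
--
--         leftContext = sent[i]
--         leftTarget = sent[i+1]
--         rightTarget = sent[i+2]
--         rightContext = sent[i+3]
--
--
--         if (leftContext[1]=="IN")&(leftTarget[1]=="UNK")&(rightTarget[1].startswith("N"))&((rightContext[0]==",")|(rightContext[0]==".")):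
--
--             sentToReturn += [leftContext]
--             sentToReturn += [(leftTarget[0], "J")]
--             sentToReturn += [rightTarget]
--             sentToReturn += [rightContext]
--             skip = 3
--
--         else:
--             sentToReturn += [leftContext]
--
--     return sentToReturn
-- ===== SOURCE B (Python) =====
-- def IN_UNK_NN_PUNC_Tagger(sent):
--     # stage 1: vectorized pattern detection over 4-token windows (no index arithmetic)
--     raw = [a[1] == "IN" and b[1] == "UNK" and c[1].startswith("N") and d[0] in (",", ".")
--            for a, b, c, d in zip(sent, sent[1:], sent[2:], sent[3:])]
--     # stage 2: resolve greedy left-to-right non-overlap; record positions to retag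
--     patched = set()
--     i = 0
--     while i < len(raw):
--         if raw[i]:
--             patched.add(i + 1)
--             i += 4
--         else:
--             i += 1
--     # stage 3: rebuild, retagging only the recorded positions
--     return [(tok[0], "J") if i in patched else tok for i, tok in enumerate(sent)]
-- ===== Notes on version B (the rewrite author's own statement) =====
-- stated objective: alternative
-- what changed: B replaces A's single fused scan with a skip counter and an append accumulator by a three-stage pipeline: a zip-comprehension marks every 4-token window that matches, a pass over that boolean array resolves the greedy non-overlap rule into a set of positions, and a final comprehension rebuilds the sentence retagging exactly those positions.
import Mathlib
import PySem

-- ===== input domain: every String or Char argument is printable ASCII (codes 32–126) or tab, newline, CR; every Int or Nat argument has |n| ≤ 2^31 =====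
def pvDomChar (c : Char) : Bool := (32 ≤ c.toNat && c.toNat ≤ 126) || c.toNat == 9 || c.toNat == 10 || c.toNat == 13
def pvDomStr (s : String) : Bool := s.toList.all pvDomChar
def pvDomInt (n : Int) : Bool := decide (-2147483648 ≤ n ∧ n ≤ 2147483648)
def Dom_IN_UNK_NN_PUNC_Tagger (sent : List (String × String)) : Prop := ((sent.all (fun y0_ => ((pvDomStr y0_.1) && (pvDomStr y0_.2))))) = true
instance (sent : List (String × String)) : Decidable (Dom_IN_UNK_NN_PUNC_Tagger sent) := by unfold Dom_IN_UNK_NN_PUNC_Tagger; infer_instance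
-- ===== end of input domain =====

-- B replaces A's fused scan (skip counter + append accumulator) by a three-stage pipeline:
-- mark all matching 4-windows, resolve the greedy non-overlap into a set of positions, rebuild.

-- ===== PORT A =====
-- for-loop with `skip`/`continue` as recursion on the index; the Python test
-- `(i)<0 | (i+3)>=len(sent)` is the chained comparison `i < (0 | (i+3)) >= len(sent)`,
-- ported literally with Nat.lor (|||).
def loopA_pv (sent : List (String × String)) (n i skip : Nat) (acc : List (String × String)) : List (String × String) :=
  if _h : i < n then
    if skip > 0 then loopA_pv sent n (i+1) (skip-1) acc
    else if (i < (0 ||| (i+3))) ∧ ((0 ||| (i+3)) ≥ n) then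
      loopA_pv sent n (i+1) skip (acc ++ [sent.getD i ("", "")])
    else
      let leftContext := sent.getD i ("", "")
      let leftTarget := sent.getD (i+1) ("", "")
      let rightTarget := sent.getD (i+2) ("", "")
      let rightContext := sent.getD (i+3) ("", "")
      if (leftContext.2 == "IN") && (leftTarget.2 == "UNK") && (PySem.Str.startswith rightTarget.2 "N") && ((rightContext.1 == ",") || (rightContext.1 == ".")) then
        loopA_pv sent n (i+1) 3 (acc ++ [leftContext] ++ [(leftTarget.1, "J")] ++ [rightTarget] ++ [rightContext])
      else
        loopA_pv sent n (i+1) skip (acc ++ [leftContext])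
  else acc
termination_by n - i
decreasing_by all_goals omega

def IN_UNK_NN_PUNC_Tagger (sent : List (String × String)) : List (String × String) :=
  loopA_pv sent sent.length 0 0 []

-- ===== PORT B =====
-- stage 1: `zip(sent, sent[1:], sent[2:], sent[3:])` + comprehension (nested zip in Lean)
def rawB_pv (sent : List (String × String)) : List Bool :=
  (((sent.zip (sent.drop 1)).zip (sent.drop 2)).zip (sent.drop 3)).map
    (fun x => (x.1.1.1.2 == "IN") && (x.1.1.2.2 == "UNK") && (PySem.Str.startswith x.1.2.2 "N") && ((x.2.1 == ",") || (x.2.1 == ".")))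

-- stage 2: while-loop over the boolean array, accumulating the set of positions to retag
def patchB_pv (raw : List Bool) (i : Nat) (patched : PySem.Set Int) : PySem.Set Int :=
  if _h : i < raw.length then
    if raw.getD i false then patchB_pv raw (i+4) (PySem.Set.add patched ((i : Int) + 1))
    else patchB_pv raw (i+1) patched
  else patched
termination_by raw.length - i
decreasing_by all_goals omega

-- stage 3: rebuild via enumerate, retagging positions in the set
def IN_UNK_NN_PUNC_Tagger_alt (sent : List (String × String)) : List (String × String) :=
  let patched := patchB_pv (rawB_pv sent) 0 PySem.Set.empty
  (PySem.List.enumerate sent).map (fun p => if PySem.Set.contains patched p.1 then (p.2.1, "J") else p.2)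

-- ===== PRECONDITION & SPEC =====
def Spec_IN_UNK_NN_PUNC_Tagger (sent : List (String × String)) (out : List (String × String)) : Prop := out = IN_UNK_NN_PUNC_Tagger_alt sent
instance (sent : List (String × String)) (out : List (String × String)) : Decidable (Spec_IN_UNK_NN_PUNC_Tagger sent out) := by unfold Spec_IN_UNK_NN_PUNC_Tagger; infer_instance

-- ===== CLAIM (what is proved, stated in full; the proofs are below) =====
def Claim_equal_IN_UNK_NN_PUNC_Tagger : Prop := ∀ (sent : List (String × String)), Dom_IN_UNK_NN_PUNC_Tagger sent → Spec_IN_UNK_NN_PUNC_Tagger sent (IN_UNK_NN_PUNC_Tagger sent)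

-- ===== LEMMAS AND PROOFS =====

-- the shared pattern test, as a proof-side abbreviation
def condPV (sent : List (String × String)) (i : Nat) : Bool :=
  ((sent.getD i ("", "")).2 == "IN") && ((sent.getD (i+1) ("", "")).2 == "UNK") && (PySem.Str.startswith (sent.getD (i+2) ("", "")).2 "N") && (((sent.getD (i+3) ("", "")).1 == ",") || ((sent.getD (i+3) ("", "")).1 == "."))

-- the common tail produced from index i onward
def tailPV (sent : List (String × String)) (n i : Nat) : List (String × String) :=
  if h : i + 3 < n then
    if condPV sent i then
      sent.getD i ("", "") :: ((sent.getD (i+1) ("", "")).1, "J") :: sent.getD (i+2) ("", "") :: sent.getD (i+3) ("", "") :: tailPV sent n (i+4)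
    else
      sent.getD i ("", "") :: tailPV sent n (i+1)
  else sent.drop i
termination_by n - i
decreasing_by all_goals omega

-- ---- A-side ----
theorem loopA_skip (sent : List (String × String)) (n i k : Nat) (acc : List (String × String))
    (h : i + k ≤ n) : loopA_pv sent n i k acc = loopA_pv sent n (i+k) 0 acc := by
  induction k generalizing i with
  | zero => rfl
  | succ k ih =>
    rw [loopA_pv, dif_pos (by omega : i < n), if_pos (by omega : k + 1 > 0)]
    simp only [Nat.add_sub_cancel]
    rw [ih (i+1) (by omega)]
    congr 1
    omega

theorem loopA_eq (sent : List (String × String)) (i : Nat) (acc : List (String × String)) :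
    loopA_pv sent sent.length i 0 acc = acc ++ tailPV sent sent.length i := by
  rw [loopA_pv, tailPV]
  by_cases h : i < sent.length
  · rw [dif_pos h]
    rw [if_neg (by omega : ¬ (0:Nat) > 0)]
    simp only [Nat.zero_or]
    by_cases hb : i + 3 < sent.length
    · rw [if_neg (by omega : ¬ (i < i + 3 ∧ i + 3 ≥ sent.length)), dif_pos hb]
      by_cases hc : condPV sent i = true
      · rw [if_pos hc]
        have hc2 := hc
        simp only [condPV] at hc2
        rw [if_pos hc2, loopA_skip sent sent.length (i+1) 3 _ (by omega), loopA_eq]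
        simp
      · rw [if_neg hc]
        have hc2 := hc
        simp only [condPV] at hc2
        rw [if_neg hc2, loopA_eq]
        simp
    · rw [if_pos (by omega : i < i + 3 ∧ i + 3 ≥ sent.length), dif_neg hb, loopA_eq]
      rw [List.drop_eq_getElem_cons h, List.getD_eq_getElem sent ("", "") h]
      have : ¬ i + 1 + 3 < sent.length := by omega
      rw [tailPV, dif_neg this]
      simp
  · rw [dif_neg h]
    rw [dif_neg (by omega : ¬ i + 3 < sent.length)]
    rw [List.drop_eq_nil_of_le (by omega : sent.length ≤ i)]
    simp
termination_by sent.length - i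
decreasing_by all_goals omega

-- ---- B-side ----
theorem rawB_length (sent : List (String × String)) : (rawB_pv sent).length = sent.length - 3 := by
  simp [rawB_pv]
  omega

theorem rawB_getD (sent : List (String × String)) (i : Nat) (h : i + 3 < sent.length) :
    (rawB_pv sent).getD i false = condPV sent i := by
  have hl : i < (rawB_pv sent).length := by rw [rawB_length]; omega
  rw [List.getD_eq_getElem _ _ hl]
  unfold rawB_pv at hl ⊢
  rw [List.getElem_map, List.getElem_zip, List.getElem_zip, List.getElem_zip,
      List.getElem_drop, List.getElem_drop, List.getElem_drop]
  simp [condPV, List.getD,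
    List.getElem?_eq_getElem (show i < sent.length by omega),
    List.getElem?_eq_getElem (show i+1 < sent.length by omega),
    List.getElem?_eq_getElem (show i+2 < sent.length by omega),
    List.getElem?_eq_getElem (show i+3 < sent.length by omega)]
  simp only [show 1+i=i+1 from by omega, show 2+i=i+2 from by omega, show 3+i=i+3 from by omega]

-- the positions added by the stage-2 loop starting at i, independent of the accumulator
def deltaPV (raw : List Bool) (i : Nat) : List Int :=
  if _h : i < raw.length then
    if raw.getD i false then ((i : Int) + 1) :: deltaPV raw (i+4) else deltaPV raw (i+1)
  else []
termination_by raw.length - i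
decreasing_by all_goals omega

theorem deltaPV_gt (raw : List Bool) (i : Nat) : ∀ j ∈ deltaPV raw i, (i : Int) < j := by
  rw [deltaPV]
  by_cases h : i < raw.length
  · rw [dif_pos h]
    by_cases hr : raw.getD i false = true
    · rw [if_pos hr]
      intro j hj
      rcases List.mem_cons.mp hj with h1 | h1
      · subst h1; omega
      · have := deltaPV_gt raw (i+4) j h1
        push_cast at this ⊢
        omega
    · rw [if_neg hr]
      intro j hj
      have := deltaPV_gt raw (i+1) j hj
      push_cast at this ⊢
      omega
  · rw [dif_neg h]
    intro j hj
    simp at hj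
termination_by raw.length - i
decreasing_by all_goals omega

theorem patchB_eq (raw : List Bool) (i : Nat) (s : PySem.Set Int)
    (hs : ∀ j ∈ s, j < (i : Int)) : patchB_pv raw i s = s ++ deltaPV raw i := by
  rw [patchB_pv, deltaPV]
  by_cases h : i < raw.length
  · rw [dif_pos h, dif_pos h]
    by_cases hr : raw.getD i false = true
    · rw [if_pos hr, if_pos hr]
      have hnot : ((i : Int) + 1) ∉ s := by
        intro hm; have := hs _ hm; omega
      have hadd : PySem.Set.add s ((i : Int) + 1) = s ++ [(i : Int) + 1] := by
        simp [PySem.Set.add, PySem.Set.contains, hnot]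
      rw [hadd, patchB_eq raw (i+4) _ (by
        intro j hj
        rcases List.mem_append.mp hj with h1 | h1
        · have := hs _ h1; push_cast; omega
        · simp at h1; subst h1; push_cast; omega)]
      simp
    · rw [if_neg hr, if_neg hr]
      rw [patchB_eq raw (i+1) s (by intro j hj; have := hs _ hj; push_cast; omega)]
  · rw [dif_neg h, dif_neg h]
    simp
termination_by raw.length - i
decreasing_by all_goals omega

theorem mapB_id (s : List Int) (l : List (String × String)) (st : Int)
    (hs : ∀ j ∈ s, j < st) :
    (PySem.List.enumerate l st).map
        (fun p => if PySem.Set.contains s p.1 then (p.2.1, "J") else p.2) = l := by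
  induction l generalizing st with
  | nil => simp [PySem.List.enumerate_nil]
  | cons a l ih =>
    rw [PySem.List.enumerate_cons, List.map_cons]
    have hns : st ∉ s := fun hm => absurd (hs _ hm) (by omega)
    rw [ih (st+1) (by intro j hj; have := hs _ hj; omega)]
    simp [PySem.Set.contains, hns]

theorem dropPV (sent : List (String × String)) (i : Nat) (h : i + 3 < sent.length) :
    sent.drop i = sent.getD i ("", "") :: sent.getD (i+1) ("", "") :: sent.getD (i+2) ("", "") :: sent.getD (i+3) ("", "") :: sent.drop (i+4) := by
  rw [List.drop_eq_getElem_cons (by omega : i < sent.length),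
      List.drop_eq_getElem_cons (by omega : i + 1 < sent.length),
      List.drop_eq_getElem_cons (by omega : i + 2 < sent.length),
      List.drop_eq_getElem_cons (by omega : i + 3 < sent.length),
      List.getD_eq_getElem sent ("", "") (by omega : i < sent.length),
      List.getD_eq_getElem sent ("", "") (by omega : i + 1 < sent.length),
      List.getD_eq_getElem sent ("", "") (by omega : i + 2 < sent.length),
      List.getD_eq_getElem sent ("", "") (by omega : i + 3 < sent.length)]

theorem mapB_eq (sent : List (String × String)) (i : Nat) (s : List Int)
    (hs : ∀ j ∈ s, j < (i : Int)) :
    (PySem.List.enumerate (sent.drop i) i).map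
        (fun p => if PySem.Set.contains (s ++ deltaPV (rawB_pv sent) i) p.1 then (p.2.1, "J") else p.2)
      = tailPV sent sent.length i := by
  rw [tailPV, deltaPV]
  by_cases h : i + 3 < sent.length
  · have hi : i < (rawB_pv sent).length := by rw [rawB_length]; omega
    rw [dif_pos h, dif_pos hi, rawB_getD sent i h]
    by_cases hc : condPV sent i = true
    · rw [if_pos hc, if_pos hc, dropPV sent i h,
         PySem.List.enumerate_cons, PySem.List.enumerate_cons, PySem.List.enumerate_cons,
         PySem.List.enumerate_cons]
      simp only [List.map_cons]
      rw [show s ++ ((i : Int) + 1) :: deltaPV (rawB_pv sent) (i+4)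
            = (s ++ [(i : Int) + 1]) ++ deltaPV (rawB_pv sent) (i+4) from by simp]
      have hrec := mapB_eq sent (i+4) (s ++ [(i : Int) + 1]) (by
        intro j hj
        rcases List.mem_append.mp hj with ha | ha
        · have := hs _ ha; push_cast; omega
        · simp at ha; subst ha; push_cast; omega)
      rw [show ((i : Nat) : Int) + 1 + 1 + 1 + 1 = (((i+4 : Nat) : Int)) from by push_cast; ring]
      rw [hrec]
      have hd4 := deltaPV_gt (rawB_pv sent) (i+4)
      simp [PySem.Set.contains]
      refine ⟨fun hx => ?_, fun hx => ?_, fun hx => ?_⟩ <;> exfalso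
      · rcases hx with h1 | h1
        · have := hs _ h1; omega
        · have := hd4 _ h1; push_cast at this; omega
      · rcases hx with h1 | h1
        · have := hs _ h1; omega
        · have := hd4 _ h1; push_cast at this; omega
      · rcases hx with h1 | h1 | h1
        · have := hs _ h1; omega
        · omega
        · have := hd4 _ h1; push_cast at this; omega
    · rw [if_neg hc, if_neg hc,
         List.drop_eq_getElem_cons (show i < sent.length by omega),
         PySem.List.enumerate_cons]
      simp only [List.map_cons]
      have hd1 := deltaPV_gt (rawB_pv sent) (i+1)
      have hm0 : ((i : Int)) ∉ s ++ deltaPV (rawB_pv sent) (i+1) := by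
        intro hm
        rcases List.mem_append.mp hm with h1 | h1
        · have := hs _ h1; omega
        · have := hd1 _ h1; push_cast at this; omega
      have hrec := mapB_eq sent (i+1) s (by intro j hj; have := hs _ hj; push_cast; omega)
      rw [show ((i : Nat) : Int) + 1 = (((i+1 : Nat) : Int)) from by push_cast; ring]
      rw [hrec, List.getD_eq_getElem sent ("", "") (show i < sent.length by omega)]
      simp [PySem.Set.contains, hm0]
  · have hi : ¬ i < (rawB_pv sent).length := by rw [rawB_length]; omega
    rw [dif_neg h, dif_neg hi, List.append_nil]
    exact mapB_id s (sent.drop i) i hs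
termination_by sent.length - i
decreasing_by all_goals omega

-- ===== VERDICT (by name: the statement is the Claim_ definition above) =====
theorem IN_UNK_NN_PUNC_Tagger_spec : Claim_equal_IN_UNK_NN_PUNC_Tagger := by
  intro sent _
  show IN_UNK_NN_PUNC_Tagger sent = IN_UNK_NN_PUNC_Tagger_alt sent
  rw [IN_UNK_NN_PUNC_Tagger, IN_UNK_NN_PUNC_Tagger_alt, loopA_eq]
  simp only [List.nil_append]
  rw [patchB_eq _ _ _ (by intro j hj; simp [PySem.Set.empty] at hj)]
  have := mapB_eq sent 0 [] (by intro j hj; simp at hj)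
  simpa [PySem.Set.empty] using this.symm
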